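-- pv_equiv track=rewrite | github.com/balubankudi/LinkedIn-Course | main.py | iseven
-- ===== SOURCE A (Python) =====
-- n = 6
--
-- def iseven(n):
--     if n <= 1:
--         return False
--     for x in range(1, n):
--         if n % 2 == 0:
--             return True
--     else:
--         return False
--
-- x = list(range(30))
-- ===== SOURCE B (Python) =====
-- def iseven(n):
--     return n > 1 and n % 2 == 0
-- ===== Notes on version B (the rewrite author's own statement) =====
-- stated objective: simpler
-- what changed: Replaced the for/else scan of range(1,n) (which runs n-1 iterations when n is odd) with the closed-form boolean expression n > 1 and n % 2 == 0.
import Mathlib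
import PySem

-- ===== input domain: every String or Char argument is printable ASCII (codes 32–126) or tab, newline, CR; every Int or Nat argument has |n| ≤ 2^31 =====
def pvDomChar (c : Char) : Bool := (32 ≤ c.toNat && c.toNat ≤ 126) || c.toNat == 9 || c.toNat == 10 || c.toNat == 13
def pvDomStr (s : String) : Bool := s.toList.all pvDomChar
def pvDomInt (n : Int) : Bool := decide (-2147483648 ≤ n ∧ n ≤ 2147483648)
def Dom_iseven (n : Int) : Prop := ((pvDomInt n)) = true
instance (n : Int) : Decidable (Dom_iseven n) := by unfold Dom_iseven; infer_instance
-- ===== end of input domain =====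

-- B replaces A's no-op for/else loop over range(1,n) with the closed form n > 1 and n % 2 == 0 (simpler).

-- ===== PORT A =====
-- the for-x-in-range(1,n) loop: returns True at the first element if n % 2 == 0, else falls through to the else-branch (False)
def isevenLoop (n : Int) : List Int → Bool
  | [] => false
  | _ :: xs => if PySem.Int.mod n 2 = 0 then true else isevenLoop n xs

def iseven (n : Int) : Bool :=
  if n ≤ 1 then false
  else isevenLoop n (PySem.List.pyRange 1 n 1)

-- ===== PORT B =====
def iseven_alt (n : Int) : Bool := decide (n > 1) && decide (PySem.Int.mod n 2 = 0)

-- ===== PRECONDITION & SPEC =====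
def Spec_iseven (n : Int) (out : Bool) : Prop := out = iseven_alt n
instance (n : Int) (out : Bool) : Decidable (Spec_iseven n out) := by unfold Spec_iseven; infer_instance

-- ===== CLAIM (what is proved, stated in full; the proofs are below) =====
def Claim_equal_iseven : Prop := ∀ (n : Int), Dom_iseven n → Spec_iseven n (iseven n)

-- ===== LEMMAS AND PROOFS =====
-- if n is odd, the loop falls through to False on any list
theorem isevenLoop_odd (n : Int) (h : ¬ PySem.Int.mod n 2 = 0) :
    ∀ l : List Int, isevenLoop n l = false := by
  intro l; induction l with
  | nil => simp [isevenLoop]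
  | cons x xs ih => show (if PySem.Int.mod n 2 = 0 then true else isevenLoop n xs) = false
                    rw [if_neg h, ih]

-- whatever the loop's list, the loop decides exactly "n % 2 == 0" as soon as the list is nonempty
theorem isevenLoop_cons (n x : Int) (xs : List Int) :
    isevenLoop n (x :: xs) = decide (PySem.Int.mod n 2 = 0) := by
  show (if PySem.Int.mod n 2 = 0 then true else isevenLoop n xs) = decide (PySem.Int.mod n 2 = 0)
  by_cases h : PySem.Int.mod n 2 = 0
  · rw [if_pos h, decide_eq_true h]
  · rw [if_neg h, isevenLoop_odd n h xs, Eq.symm (decide_eq_false h)]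

-- ===== VERDICT (by name: the statement is the Claim_ definition above) =====
theorem iseven_spec : Claim_equal_iseven := by
  intro n _
  unfold Spec_iseven iseven iseven_alt
  by_cases h : n ≤ 1
  · have : ¬ (1:Int) < n := by omega
    simp [h, this]
  · have h1 : (1:Int) < n := by omega
    have hne : PySem.List.pyRange 1 n 1 ≠ [] := by
      have : (PySem.List.pyRange 1 n 1).length = (n-1).toNat := PySem.List.length_pyRange_one 1 n
      intro hc; rw [hc] at this; simp at this; omega
    obtain ⟨x, xs, hx⟩ := List.exists_cons_of_ne_nil hne
    simp [h, hx, isevenLoop_cons, h1]
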